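-- pv_equiv track=rewrite | github.com/duckbill413/coding_test | python/programmers/[PCCP 모의고사 1] 1번.py | solution
-- ===== SOURCE A (Python) =====
-- import collections
--
-- def solution(input_string):
--     d = collections.defaultdict(int)
--
--     for n in input_string:
--         d[n] += 1
--
--     answer = set()
--
--     i = 0
--     while i < len(input_string):
--         pivot = input_string[i]
--         if pivot in answer or d[pivot] == 1:
--             i += 1
--             continue
--         count = 0
--         for j in range(i, len(input_string)):
--             if pivot == input_string[j]:
--                 count += 1
--                 i = j
--             else:
--                 i = j - 1
--                 break
--
--         if d[pivot] != count:
--             answer.add(pivot)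
--         i += 1
--
--     answer = list(answer)
--     answer.sort()
--     return ''.join(answer) if len(answer) > 0 else 'N'
-- ===== SOURCE B (Python) =====
-- def solution(input_string):
--     seen = set()
--     answer = set()
--     prev = None
--     for c in input_string:
--         if c != prev:
--             if c in seen:
--                 answer.add(c)
--             else:
--                 seen.add(c)
--             prev = c
--     return ''.join(sorted(answer)) if answer else 'N'
-- ===== Notes on version B (the rewrite author's own statement) =====
-- stated objective: simpler
-- what changed: Replaced the frequency dict plus the index-jumping while loop (which re-scans each run and compares run length to total count) with a single pass over the characters that detects run starts via the previous character and adds a character to the answer when its second run begins.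
import Mathlib
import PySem

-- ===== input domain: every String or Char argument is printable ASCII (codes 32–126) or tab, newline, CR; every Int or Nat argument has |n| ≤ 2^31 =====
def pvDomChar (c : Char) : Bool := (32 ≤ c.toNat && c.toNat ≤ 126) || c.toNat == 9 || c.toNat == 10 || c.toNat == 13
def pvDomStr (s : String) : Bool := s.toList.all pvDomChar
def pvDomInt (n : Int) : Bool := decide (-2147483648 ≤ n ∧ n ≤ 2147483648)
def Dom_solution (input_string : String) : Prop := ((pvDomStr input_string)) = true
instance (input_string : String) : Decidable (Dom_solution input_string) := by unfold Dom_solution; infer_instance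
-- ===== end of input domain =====

-- B replaces A's frequency dict and index-jumping run counter by one pass over run starts; objective: simpler.

-- ===== PORT A =====

-- inner 'for j in range(i, len)' loop of A; state (count, i); indices are in
-- range whenever read (the loop walks a run that starts inside the list), so
-- 'getD' is exact here.
def solInner (l : List Char) (pivot : Char) : List Nat → Nat → Nat → Nat × Nat
  | [], count, i => (count, i)
  | j :: js, count, i =>
    if pivot == l.getD j ' ' then solInner l pivot js (count + 1) j
    else (count, j - 1)

-- the outer 'while i < len' loop; i increases by at least 1 each iteration, so
-- fuel = len + 1 (supplied below) always suffices and the port is exact.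
def solLoop (l : List Char) (d : PySem.Dict Char Int) :
    Nat → Nat → PySem.Set Char → PySem.Set Char
  | 0, _, ans => ans
  | fuel + 1, i, ans =>
    if i < l.length then
      let pivot := l.getD i ' '
      if PySem.Set.contains ans pivot || (d.getD pivot 0 == 1) then
        solLoop l d fuel (i + 1) ans
      else
        let r := solInner l pivot (List.range' i (l.length - i)) 0 i
        let ans' := if d.getD pivot 0 != (r.1 : Int) then PySem.Set.add ans pivot else ans
        solLoop l d fuel (r.2 + 1) ans'
    else ans

def solution (input_string : String) : String :=
  let l := input_string.toList
  let d := l.foldl (fun d n => d.modify n 0 (· + 1)) PySem.Dict.empty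
  let answer := solLoop l d (l.length + 1) 0 PySem.Set.empty
  let answer2 := PySem.List.sorted answer (fun x => x) false
  if 0 < answer2.length then String.mk answer2 else "N"

-- ===== PORT B =====

-- B's single pass: prev = last seen char, seen = chars that started a run,
-- answer = chars that started a second run.
def altLoop : List Char → Option Char → PySem.Set Char → PySem.Set Char → PySem.Set Char
  | [], _, _, ans => ans
  | c :: cs, prev, seen, ans =>
    if prev == some c then altLoop cs prev seen ans
    else if PySem.Set.contains seen c then altLoop cs (some c) seen (PySem.Set.add ans c)
    else altLoop cs (some c) (PySem.Set.add seen c) ans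

def solution_alt (input_string : String) : String :=
  let answer := altLoop input_string.toList none PySem.Set.empty PySem.Set.empty
  if answer = [] then "N" else String.mk (PySem.List.sorted answer (fun x => x) false)

-- ===== PRECONDITION & SPEC =====
def Spec_solution (input_string : String) (out : String) : Prop := out = solution_alt input_string
instance (input_string : String) (out : String) : Decidable (Spec_solution input_string out) := by unfold Spec_solution; infer_instance

-- ===== CLAIM (what is proved, stated in full; the proofs are below) =====
def Claim_equal_solution : Prop := ∀ (input_string : String), Dom_solution input_string → Spec_solution input_string (solution input_string)

-- ===== LEMMAS AND PROOFS =====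

-- heads p cs = the first characters of the maximal runs of cs, given that the
-- character just before cs was p (none = start of string).
def heads : Option Char → List Char → List Char
  | _, [] => []
  | p, c :: cs => if p == some c then heads p cs else c :: heads (some c) cs

theorem count_heads_le (c : Char) : ∀ (p : Option Char) (xs : List Char),
    (heads p xs).count c ≤ xs.count c := by
  intro p xs
  induction xs generalizing p with
  | nil => simp [heads]
  | cons x xs ih =>
    simp only [heads]
    split
    · exact le_trans (ih p) (List.count_le_count_cons ..)
    · simp only [List.count_cons]
      exact Nat.add_le_add (ih (some x)) (le_refl _)

theorem count_heads_some (c p : Char) (hcp : c ≠ p) (xs : List Char) :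
    (heads (some p) xs).count c = (heads none xs).count c := by
  cases xs with
  | nil => rfl
  | cons x xs =>
    by_cases hx : p = x
    · subst hx
      have : ¬ p = c := fun h => hcp h.symm
      simp [heads, List.count_cons, this]
    · simp [heads, hx]

theorem heads_all_run (p : Char) : ∀ (P rest : List Char), (∀ x ∈ P, x = p) →
    heads (some p) (P ++ rest) = heads (some p) rest := by
  intro P
  induction P with
  | nil => simp
  | cons x P ih =>
    intro rest h
    have hx : x = p := h x (by simp)
    subst hx
    simp only [List.cons_append, heads, beq_self_eq_true, if_pos]
    exact ih rest (fun y hy => h y (by simp [hy]))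

theorem mem_heads (c : Char) : ∀ (xs : List Char) (p : Option Char),
    c ∈ xs → p ≠ some c → c ∈ heads p xs := by
  intro xs
  induction xs with
  | nil => simp
  | cons x xs ih =>
    intro p hmem hp
    simp only [heads]
    by_cases hpx : p = some x
    · subst hpx
      simp only [beq_self_eq_true, if_pos rfl]
      rcases List.mem_cons.mp hmem with h | h
      · exact absurd (by rw [h]) hp
      · exact ih _ h hp
    · have : (p == some x) = false := by
        cases p <;> simp_all
      rw [this]
      simp only [Bool.false_eq_true, if_false]
      rcases List.mem_cons.mp hmem with h | h
      · simp [h]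
      · by_cases hcx : c = x
        · simp [hcx]
        · exact List.mem_cons_of_mem _ (ih (some x) h (by intro hh; exact hcx (Option.some.injEq .. ▸ hh.symm ▸ rfl)))

-- B-side characterisation.
theorem altLoop_mem (c : Char) : ∀ (cs : List Char) (p : Option Char)
    (seen ans : PySem.Set Char),
    (c ∈ altLoop cs p seen ans ↔
      c ∈ ans ∨ (c ∈ seen ∧ c ∈ heads p cs) ∨ 2 ≤ (heads p cs).count c) := by
  intro cs
  induction cs with
  | nil => intro p seen ans; simp [altLoop, heads]
  | cons x cs ih =>
    intro p seen ans
    simp only [altLoop, heads]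
    by_cases hp : p = some x
    · subst hp
      simp only [beq_self_eq_true, if_pos]
      exact ih _ _ _
    · have hbe : (p == some x) = false := by cases p <;> simp_all
      rw [hbe]
      simp only [Bool.false_eq_true, if_false]
      by_cases hs : PySem.Set.contains seen x = true
      · rw [if_pos hs]
        have hsx : x ∈ seen := (PySem.Set.contains_iff _ _).mp hs
        rw [ih]
        by_cases hc : c = x
        · subst hc
          simp [PySem.Set.mem_add, hsx]
        · have hxc : ¬ x = c := fun h => hc h.symm
          simp [PySem.Set.mem_add, hc, List.count_cons, hxc]
      · rw [if_neg (by simp_all)]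
        have hsx : x ∉ seen := fun h => hs ((PySem.Set.contains_iff _ _).mpr h)
        rw [ih]
        by_cases hc : c = x
        · subst hc
          simp only [PySem.Set.mem_add, hsx, List.count_cons, beq_self_eq_true,
            if_pos, List.mem_cons, true_or, and_true, or_true, false_and, false_or,
            or_false, eq_self_iff_true, true_and]
          by_cases hA : c ∈ ans
          · simp [hA]
          · simp [hA, ← List.count_pos_iff]
            omega
        · have hxc : ¬ x = c := fun h => hc h.symm
          simp [PySem.Set.mem_add, hc, List.count_cons, hxc]

theorem altLoop_nodup : ∀ (cs : List Char) (p : Option Char)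
    (seen ans : PySem.Set Char), ans.Nodup → (altLoop cs p seen ans).Nodup := by
  intro cs
  induction cs with
  | nil => intro _ _ _ h; exact h
  | cons x cs ih =>
    intro p seen ans h
    simp only [altLoop]
    split
    · exact ih _ _ _ h
    · split
      · exact ih _ _ _ (PySem.Set.nodup_add _ _ h)
      · exact ih _ _ _ h

-- A-side helpers: the maximal run of `pivot` starting at position i.
def pivotRun (l : List Char) (pivot : Char) (i : Nat) : Nat :=
  ((l.drop i).takeWhile (· == pivot)).length

theorem getD_eq_getElem_of_lt (l : List Char) (i : Nat) (h : i < l.length) :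
    l.getD i ' ' = l[i] := by
  simp [List.getD_eq_getElem?_getD, List.getElem?_eq_getElem h]

theorem pivotRun_le (l : List Char) (pivot : Char) (i : Nat) (h : i ≤ l.length) :
    i + pivotRun l pivot i ≤ l.length := by
  have h1 : pivotRun l pivot i ≤ (l.drop i).length :=
    (List.takeWhile_sublist _).length_le
  have h2 : (l.drop i).length = l.length - i := List.length_drop ..
  omega

theorem pivotRun_succ (l : List Char) (pivot : Char) (i : Nat) (h : i < l.length) :
    pivotRun l pivot i = if l[i] = pivot then pivotRun l pivot (i + 1) + 1 else 0 := by
  unfold pivotRun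
  rw [List.drop_eq_getElem_cons h, List.takeWhile_cons]
  by_cases hp : l[i] = pivot <;> simp [hp]

theorem run_decomp (l : List Char) (pivot : Char) (i : Nat) :
    l.drop i = List.replicate (pivotRun l pivot i) pivot ++ l.drop (i + pivotRun l pivot i) := by
  have h1 : (l.drop i).takeWhile (· == pivot) = List.replicate (pivotRun l pivot i) pivot := by
    rw [List.eq_replicate_iff]
    exact ⟨rfl, fun b hb => by simpa using List.mem_takeWhile_imp hb⟩
  have h2 : l.drop (i + pivotRun l pivot i) = (l.drop i).dropWhile (· == pivot) := by
    have h3 : l.drop (i + pivotRun l pivot i) = (l.drop i).drop (pivotRun l pivot i) := by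
      rw [List.drop_drop]
    rw [h3]
    conv_lhs => rw [← List.takeWhile_append_dropWhile (p := (· == pivot)) (l := l.drop i)]
    have h4 : pivotRun l pivot i = ((l.drop i).takeWhile (· == pivot)).length := rfl
    rw [h4, List.drop_left]
  rw [h2, ← h1, List.takeWhile_append_dropWhile]

theorem rest_head_ne (l : List Char) (pivot : Char) (i : Nat)
    (h : i + pivotRun l pivot i < l.length) : l[i + pivotRun l pivot i]'h ≠ pivot := by
  have h2 : l.drop (i + pivotRun l pivot i) = (l.drop i).dropWhile (· == pivot) := by
    have h3 : l.drop (i + pivotRun l pivot i) = (l.drop i).drop (pivotRun l pivot i) := by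
      rw [List.drop_drop]
    have h1 : (l.drop i).takeWhile (· == pivot) = List.replicate (pivotRun l pivot i) pivot := by
      rw [List.eq_replicate_iff]
      exact ⟨rfl, fun b hb => by simpa using List.mem_takeWhile_imp hb⟩
    rw [h3]
    conv_lhs => rw [← List.takeWhile_append_dropWhile (p := (· == pivot)) (l := l.drop i)]
    have h4 : pivotRun l pivot i = ((l.drop i).takeWhile (· == pivot)).length := rfl
    rw [h4, List.drop_left]
  have hhd := List.head?_dropWhile_not (· == pivot) (l.drop i)
  rw [← h2] at hhd
  have h5 : (l.drop (i + pivotRun l pivot i)).head? = some (l[i + pivotRun l pivot i]'h) := by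
    rw [List.drop_eq_getElem_cons h]; rfl
  rw [h5] at hhd
  simpa using hhd

theorem solInner_spec (l : List Char) (pivot : Char) : ∀ (m i count cur : Nat),
    i + m ≤ l.length →
    solInner l pivot (List.range' i m) count cur =
      (if m = 0 then (count, cur)
       else if pivotRun l pivot i = 0 then (count, i - 1)
       else (count + min (pivotRun l pivot i) m, i + min (pivotRun l pivot i) m - 1)) := by
  intro m
  induction m with
  | zero => intro i count cur h; simp [solInner]
  | succ m ih =>
    intro i count cur h
    have hi : i < l.length := by omega
    rw [List.range'_succ]
    simp only [solInner, getD_eq_getElem_of_lt l i hi]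
    rw [pivotRun_succ l pivot i hi]
    by_cases hp : l[i] = pivot
    · rw [if_pos (by simp [hp]), ih (i + 1) (count + 1) i (by omega), if_pos hp]
      split_ifs <;> simp_all [Prod.ext_iff] <;> omega
    · rw [if_neg (by simp [Ne.symm hp]), if_neg hp]
      simp

-- A-side characterisation.
theorem solLoop_mem (l : List Char) (c : Char) : ∀ (fuel i : Nat) (ans : PySem.Set Char),
    l.length - i < fuel →
    (∀ j : Nat, j + 1 = i → i < l.length → l.getD j ' ' = l.getD i ' ' → l.getD i ' ' ∈ ans) →
    (∀ x : Char, x ∉ ans → 0 < (l.take i).count x → (l.drop i).count x = 0) →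
    (c ∈ solLoop l (PySem.Dict.counter l) fuel i ans ↔
      c ∈ ans ∨ 2 ≤ (heads none (l.drop i)).count c) := by
  intro fuel
  induction fuel with
  | zero => intro i ans h; omega
  | succ fuel ih =>
    intro i ans hfuel hmid hdone
    simp only [solLoop]
    by_cases hi : i < l.length
    case neg =>
      rw [if_neg hi]
      have hdrop : l.drop i = [] := List.drop_eq_nil_of_le (by omega)
      simp [hdrop, heads]
    rw [if_pos hi]
    rw [getD_eq_getElem_of_lt l i hi] at hmid ⊢
    set pivot := l[i]'hi with hpivdef
    have hgdc : (PySem.Dict.counter l).getD pivot 0 = (l.count pivot : Int) :=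
      PySem.Dict.getD_counter l pivot
    have hsplit : ∀ (x : Char) (k : Nat),
        l.count x = (l.take k).count x + (l.drop k).count x := by
      intro x k
      conv_lhs => rw [← List.take_append_drop k l]
      rw [List.count_append]
    have hdropi : l.drop i = pivot :: l.drop (i + 1) := List.drop_eq_getElem_cons hi
    have hheadsi : heads none (l.drop i) = pivot :: heads (some pivot) (l.drop (i + 1)) := by
      rw [hdropi]; simp [heads]
    by_cases hskip : (PySem.Set.contains ans pivot
        || ((PySem.Dict.counter l).getD pivot 0 == 1)) = true
    · rw [if_pos hskip]
      have hskip' : pivot ∈ ans ∨ l.count pivot = 1 := by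
        rw [Bool.or_eq_true] at hskip
        rcases hskip with h | h
        · exact Or.inl ((PySem.Set.contains_iff _ _).mp h)
        · right
          rw [hgdc] at h
          exact_mod_cast beq_iff_eq.mp h
      have hcd1 : 0 < (l.drop i).count pivot := by rw [hdropi]; simp
      have hmid' : ∀ j : Nat, j + 1 = i + 1 → i + 1 < l.length →
          l.getD j ' ' = l.getD (i + 1) ' ' → l.getD (i + 1) ' ' ∈ ans := by
        intro j hj hlt heq
        have hji : j = i := by omega
        rw [hji] at heq
        have hg1 : l.getD i ' ' = pivot := getD_eq_getElem_of_lt l i hi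
        have hg2 : l.getD (i + 1) ' ' = l[i + 1]'hlt := getD_eq_getElem_of_lt l (i + 1) hlt
        rcases hskip' with ha | h1
        · rw [← heq, hg1]; exact ha
        · exfalso
          have hd2 : l.drop (i + 1) = l[i + 1]'hlt :: l.drop (i + 2) :=
            List.drop_eq_getElem_cons hlt
          have he : l[i + 1]'hlt = pivot := by rw [← hg2, ← heq, hg1]
          have h2c : 2 ≤ (l.drop i).count pivot := by
            rw [hdropi, hd2, he]; simp
          have := hsplit pivot i
          omega
      have hdone' : ∀ x : Char, x ∉ ans → 0 < (l.take (i + 1)).count x →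
          (l.drop (i + 1)).count x = 0 := by
        intro x hx hcx
        have htake : (l.take (i + 1)).count x
            = (l.take i).count x + (if pivot = x then 1 else 0) := by
          rw [List.take_add_one, List.getElem?_eq_getElem hi, ← hpivdef,
            Option.toList_some, List.count_append]
          by_cases hpx : pivot = x
          · simp [hpx]
          · simp [List.count_cons, hpx, fun h : x = pivot => hpx h.symm]
        by_cases hxp : x = pivot
        · rcases hskip' with ha | h1
          · exact absurd (by rw [hxp]; exact ha) hx
          · have hs := hsplit pivot i
            have hdd : (l.drop i).count pivot = 1 + (l.drop (i + 1)).count pivot := by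
              rw [hdropi]; simp; omega
            rw [hxp] at hcx htake ⊢
            simp only [if_pos rfl] at htake
            omega
        · have hz : (if pivot = x then 1 else 0) = 0 := if_neg (fun h => hxp h.symm)
          have h0 : 0 < (l.take i).count x := by omega
          have := hdone x hx h0
          have hdd : (l.drop i).count x = (l.drop (i + 1)).count x := by
            rw [hdropi, List.count_cons,
              beq_eq_false_iff_ne.mpr (fun h : pivot = x => hxp h.symm)]
            simp
          omega
      rw [ih (i + 1) ans (by omega) hmid' hdone']
      by_cases hc : c = pivot
      · rw [hc]
        rcases hskip' with ha | h1
        · simp [ha]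
        · have hsp := hsplit pivot i
          have hdd : (l.drop i).count pivot = 1 + (l.drop (i + 1)).count pivot := by
            rw [hdropi]; simp; omega
          have hb1 : (heads (some pivot) (l.drop (i + 1))).count pivot
              ≤ (l.drop (i + 1)).count pivot := count_heads_le pivot _ _
          have hb2 : (heads none (l.drop (i + 1))).count pivot
              ≤ (l.drop (i + 1)).count pivot := count_heads_le pivot _ _
          rw [hheadsi, List.count_cons, beq_self_eq_true, if_pos rfl]
          have hz1 : ¬ 2 ≤ (heads none (l.drop (i + 1))).count pivot := by omega
          have hz2 : ¬ 2 ≤ (heads (some pivot) (l.drop (i + 1))).count pivot + 1 := by omega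
          tauto
      · rw [hheadsi, List.count_cons,
          beq_eq_false_iff_ne.mpr (fun h : pivot = c => hc h.symm)]
        simp only [Bool.false_eq_true, if_false, Nat.add_zero]
        rw [count_heads_some c pivot hc]
    · rw [if_neg hskip]
      have hnB : pivot ∉ ans ∧ l.count pivot ≠ 1 := by
        rw [Bool.or_eq_true] at hskip
        push_neg at hskip
        obtain ⟨h1, h2⟩ := hskip
        constructor
        · exact fun hh => h1 ((PySem.Set.contains_iff _ _).mpr hh)
        · intro hh
          apply h2
          rw [hgdc, hh]
          simp
      set w := pivotRun l pivot i with hwdef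
      have hw1 : 0 < w := by
        rw [hwdef, pivotRun_succ l pivot i hi, if_pos hpivdef.symm]
        omega
      have hwle : i + w ≤ l.length := by
        rw [hwdef]; exact pivotRun_le l pivot i (le_of_lt hi)
      have hrw : solInner l pivot (List.range' i (l.length - i)) 0 i = (w, i + w - 1) := by
        rw [solInner_spec l pivot (l.length - i) i 0 i (by omega), ← hwdef,
          if_neg (by omega), if_neg (by omega)]
        have hmin : min w (l.length - i) = w := by omega
        rw [hmin, Nat.zero_add]
      rw [hrw]
      have hi1 : (w, i + w - 1).2 + 1 = i + w := by
        show i + w - 1 + 1 = i + w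
        omega
      rw [hi1]
      have hdec : l.drop i = List.replicate w pivot ++ l.drop (i + w) := by
        rw [hwdef]; exact run_decomp l pivot i
      have hcrep : ∀ x : Char, (List.replicate w pivot).count x
          = if pivot = x then w else 0 := by
        intro x
        rw [List.count_replicate]
        by_cases hh : pivot = x <;> simp [hh]
      have hpnotake : (l.take i).count pivot = 0 := by
        by_contra hh
        have hz := hdone pivot hnB.1 (by omega)
        rw [hdec, List.count_append, hcrep pivot, if_pos rfl] at hz
        omega
      have hcountp : l.count pivot = w + (l.drop (i + w)).count pivot := by
        have hs := hsplit pivot i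
        rw [hdec, List.count_append, hcrep pivot, if_pos rfl] at hs
        omega
      have hheadsw : heads none (l.drop i) = pivot :: heads (some pivot) (l.drop (i + w)) := by
        have hw' : w = (w - 1) + 1 := by omega
        rw [hdec, hw', List.replicate_succ, List.cons_append]
        simp only [heads]
        rw [if_neg (by simp)]
        congr 1
        exact heads_all_run pivot (List.replicate (w - 1) pivot) _
          (fun x hx => List.eq_of_mem_replicate hx)
      have hrun_elem : ∀ k : Nat, k < w → l.getD (i + k) ' ' = pivot := by
        intro k hk
        have hlt : i + k < l.length := by omega
        rw [getD_eq_getElem_of_lt l _ hlt]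
        have hdl : k < (l.drop i).length := by rw [List.length_drop]; omega
        have hge : l[i + k]'hlt = (l.drop i)[k]'hdl := (List.getElem_drop (h := hdl)).symm
        rw [hge, List.getElem_of_eq hdec hdl]
        rw [List.getElem_append_left (by simp [hk])]
        exact List.getElem_replicate ..
      have hgdw : l.getD (i + w) ' ' ≠ pivot ∨ ¬ i + w < l.length := by
        by_cases hlt : i + w < l.length
        · left
          have hlt' : i + pivotRun l pivot i < l.length := by rw [← hwdef]; exact hlt
          have h := rest_head_ne l pivot i hlt'
          rw [getD_eq_getElem_of_lt l _ hlt]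
          intro hh
          apply h
          rw [← getD_eq_getElem_of_lt l _ hlt']
          rw [← hwdef]
          rw [getD_eq_getElem_of_lt l _ hlt]
          exact hh
        · exact Or.inr hlt
      have hmid'' : ∀ j : Nat, j + 1 = i + w → i + w < l.length →
          l.getD j ' ' = l.getD (i + w) ' ' → False := by
        intro j hj hlt heq
        have hji : j = i + (w - 1) := by omega
        rw [hji] at heq
        have h1 : l.getD (i + (w - 1)) ' ' = pivot := hrun_elem (w - 1) (by omega)
        rcases hgdw with hne | hh
        · exact hne (by rw [← heq, h1])
        · exact hh hlt
      have htk : ∀ x : Char, x ≠ pivot → (l.take (i + w)).count x = (l.take i).count x := by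
        intro x hxp
        rw [List.take_add, List.count_append]
        have htw : (l.drop i).take w = List.replicate w pivot := by
          rw [hdec]
          exact List.take_left' (by simp)
        rw [htw, hcrep x, if_neg (fun hh => hxp hh.symm)]
        omega
      have hdone'' : ∀ x : Char, x ≠ pivot → x ∉ ans → 0 < (l.take (i + w)).count x →
          (l.drop (i + w)).count x = 0 := by
        intro x hxp hx hcx
        rw [htk x hxp] at hcx
        have hz := hdone x hx hcx
        rw [hdec, List.count_append] at hz
        omega
      by_cases hadd : ((PySem.Dict.counter l).getD pivot 0 != ((w : Nat) : Int)) = true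
      · rw [if_pos hadd]
        have hne : l.count pivot ≠ w := by
          intro hh
          rw [hgdc, hh] at hadd
          simp at hadd
        have hpin : pivot ∈ l.drop (i + w) := by
          apply List.count_pos_iff.mp
          omega
        have hiwlt : i + w < l.length := by
          by_contra hh
          have hz : l.drop (i + w) = [] := List.drop_eq_nil_of_le (by omega)
          rw [hz] at hpin
          simp at hpin
        have hheadne : l[i + w]'hiwlt ≠ pivot := by
          rcases hgdw with hne' | hh
          · rw [← getD_eq_getElem_of_lt l _ hiwlt]
            exact hne'
          · exact absurd hiwlt hh
        have hdw : l.drop (i + w) = l[i + w]'hiwlt :: l.drop (i + w + 1) :=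
          List.drop_eq_getElem_cons hiwlt
        have hpinheads : pivot ∈ heads (some pivot) (l.drop (i + w)) := by
          rw [hdw] at hpin ⊢
          simp only [heads]
          rw [if_neg (by
            simp only [beq_iff_eq, Option.some.injEq]
            exact fun h => hheadne h.symm)]
          rcases List.mem_cons.mp hpin with h | h
          · exact absurd h.symm hheadne
          · exact List.mem_cons_of_mem _
              (mem_heads pivot _ (some (l[i + w]'hiwlt)) h (by simp [hheadne]))
        have hmidA : ∀ j : Nat, j + 1 = i + w → i + w < l.length →
            l.getD j ' ' = l.getD (i + w) ' ' → l.getD (i + w) ' ' ∈ PySem.Set.add ans pivot :=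
          fun j hj hlt heq => absurd heq (fun heq => hmid'' j hj hlt heq)
        have hdoneA : ∀ x : Char, x ∉ PySem.Set.add ans pivot →
            0 < (l.take (i + w)).count x → (l.drop (i + w)).count x = 0 := by
          intro x hx hcx
          have hxa : x ∉ ans := fun hh => hx ((PySem.Set.mem_add _ _ _).mpr (Or.inl hh))
          have hxp : x ≠ pivot := fun hh => hx ((PySem.Set.mem_add _ _ _).mpr (Or.inr hh))
          exact hdone'' x hxp hxa hcx
        rw [ih (i + w) (PySem.Set.add ans pivot) (by omega) hmidA hdoneA]
        rw [hheadsw]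
        by_cases hc : c = pivot
        · rw [hc]
          have hcp : 0 < (heads (some pivot) (l.drop (i + w))).count pivot :=
            List.count_pos_iff.mpr hpinheads
          constructor
          · intro _
            right
            rw [List.count_cons, beq_self_eq_true, if_pos rfl]
            omega
          · intro _
            left
            exact (PySem.Set.mem_add _ _ _).mpr (Or.inr rfl)
        · rw [List.count_cons,
            beq_eq_false_iff_ne.mpr (fun h : pivot = c => hc h.symm)]
          simp only [Bool.false_eq_true, if_false, Nat.add_zero]
          rw [count_heads_some c pivot hc]
          simp [PySem.Set.mem_add, hc]
      · rw [if_neg hadd]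
        have hceq : l.count pivot = w := by
          rw [hgdc] at hadd
          simp only [bne_iff_ne, ne_eq, not_not] at hadd
          exact_mod_cast hadd
        have hrest0 : (l.drop (i + w)).count pivot = 0 := by omega
        have hmidA : ∀ j : Nat, j + 1 = i + w → i + w < l.length →
            l.getD j ' ' = l.getD (i + w) ' ' → l.getD (i + w) ' ' ∈ ans :=
          fun j hj hlt heq => absurd heq (fun heq => hmid'' j hj hlt heq)
        have hdoneB : ∀ x : Char, x ∉ ans → 0 < (l.take (i + w)).count x →
            (l.drop (i + w)).count x = 0 := by
          intro x hx hcx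
          by_cases hxp : x = pivot
          · rw [hxp]; exact hrest0
          · exact hdone'' x hxp hx hcx
        rw [ih (i + w) ans (by omega) hmidA hdoneB]
        rw [hheadsw]
        by_cases hc : c = pivot
        · rw [hc]
          have hb1 : (heads (some pivot) (l.drop (i + w))).count pivot
              ≤ (l.drop (i + w)).count pivot := count_heads_le pivot _ _
          have hb2 : (heads none (l.drop (i + w))).count pivot
              ≤ (l.drop (i + w)).count pivot := count_heads_le pivot _ _
          rw [List.count_cons, beq_self_eq_true, if_pos rfl]
          have hz1 : ¬ 2 ≤ (heads none (l.drop (i + w))).count pivot := by omega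
          have hz2 : ¬ 2 ≤ (heads (some pivot) (l.drop (i + w))).count pivot + 1 := by omega
          tauto
        · rw [List.count_cons,
            beq_eq_false_iff_ne.mpr (fun h : pivot = c => hc h.symm)]
          simp only [Bool.false_eq_true, if_false, Nat.add_zero]
          rw [count_heads_some c pivot hc]

theorem solLoop_nodup (l : List Char) (d : PySem.Dict Char Int) :
    ∀ (fuel i : Nat) (ans : PySem.Set Char), ans.Nodup → (solLoop l d fuel i ans).Nodup := by
  intro fuel
  induction fuel with
  | zero => intro _ _ h; exact h
  | succ fuel ih =>
    intro i ans h
    simp only [solLoop]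
    split
    · split
      · exact ih _ _ h
      · split
        · exact ih _ _ (PySem.Set.nodup_add _ _ h)
        · exact ih _ _ h
    · exact h

-- ===== VERDICT (by name: the statement is the Claim_ definition above) =====
theorem solution_spec : Claim_equal_solution := by
  unfold Claim_equal_solution
  intro s _hdom
  unfold Spec_solution
  have hd : s.toList.foldl (fun d n => d.modify n 0 (· + 1)) PySem.Dict.empty
      = PySem.Dict.counter s.toList := (PySem.Dict.counter_eq_foldl _).symm
  simp only [solution, solution_alt, hd]
  set SA := solLoop s.toList (PySem.Dict.counter s.toList) (s.toList.length + 1) 0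
    PySem.Set.empty with hSA
  set SB := altLoop s.toList none PySem.Set.empty PySem.Set.empty with hSB
  have hmem : ∀ x : Char, x ∈ SA ↔ x ∈ SB := by
    intro x
    rw [hSA, hSB,
      solLoop_mem s.toList x (s.toList.length + 1) 0 PySem.Set.empty (by omega)
        (fun j hj => absurd hj (by omega))
        (fun y hy hcy => by simp at hcy),
      altLoop_mem x s.toList none PySem.Set.empty PySem.Set.empty]
    simp [PySem.Set.empty, List.drop_zero]
  have hndA : SA.Nodup := solLoop_nodup _ _ _ _ _ List.nodup_nil
  have hndB : SB.Nodup := altLoop_nodup _ _ _ _ List.nodup_nil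
  have hperm : SA.Perm SB := (List.perm_ext_iff_of_nodup hndA hndB).mpr hmem
  have hsorted : PySem.List.sorted SA (fun x => x) = PySem.List.sorted SB (fun x => x) :=
    PySem.List.sorted_eq_sorted_of_perm SA SB _ (fun a b h => h) hperm
  by_cases hB : SB = []
  · have hA : SA = [] := by
      rw [List.eq_nil_iff_forall_not_mem]
      intro x hx
      have hh := (hmem x).mp hx
      rw [hB] at hh
      simp at hh
    rw [if_pos hB, hA]
    have hz : PySem.List.sorted ([] : List Char) (fun x => x) = [] := by
      rw [PySem.List.sorted_eq_nil_iff]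
    rw [hz]
    simp
  · rw [if_neg hB]
    have hA : SA ≠ [] := by
      intro h
      apply hB
      rw [List.eq_nil_iff_forall_not_mem]
      intro x hx
      have hh := (hmem x).mpr hx
      rw [h] at hh
      simp at hh
    have hlen : 0 < (PySem.List.sorted SA (fun x => x)).length := by
      rw [PySem.List.length_sorted]
      exact List.length_pos_iff.mpr hA
    rw [if_pos hlen, hsorted]
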